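-- pv_equiv track=rewrite | github.com/LEE-JAEHAK/LeetCode | 0778-swim-in-rising-water/0778-swim-in-rising-water.py | BFS
-- ===== SOURCE A (Python) =====
-- from collections import deque
--
-- def BFS(graph, rain):
--     if graph[0][0] > rain:
--         return None
--     n = len(graph)
--     q = deque()
--     q.append((0,0))
--     visited = [[-1]*n for _ in range(n)]
--     visited[0][0] = 1
--     dx = [-1,1,0,0]
--     dy = [0,0,-1,1]
--     while q:
--         x,y = q.popleft()
--         if x == n-1 and y == n-1:
--             return rain
--         for i in range(4):
--             nx, ny = x+dx[i], y+dy[i]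
--             if 0<=nx<n and 0<=ny<n and visited[nx][ny] == -1 and graph[nx][ny] <= rain:
--                 q.append((nx,ny))
--                 visited[nx][ny] += 1
-- ===== SOURCE B (Python) =====
-- def BFS(graph, rain):
--     if graph[0][0] > rain:
--         return None
--     n = len(graph)
--     reach = [[x == 0 and y == 0 for y in range(n)] for x in range(n)]
--     for _ in range(n * n):
--         new = [[reach[x][y] or (graph[x][y] <= rain and (
--                     (x > 0 and reach[x - 1][y]) or
--                     (x + 1 < n and reach[x + 1][y]) or
--                     (y > 0 and reach[x][y - 1]) or
--                     (y + 1 < n and reach[x][y + 1])))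
--                 for y in range(n)] for x in range(n)]
--         if new == reach:
--             break
--         reach = new
--     return rain if reach[n - 1][n - 1] else None
-- ===== Notes on version B (the rewrite author's own statement) =====
-- stated objective: alternative
-- what changed: Replaces the deque BFS with a visited matrix and early exit by a Jacobi-style fixed-point relaxation: a boolean reach grid seeded at (0,0) is recomputed by whole-grid sweeps (a cell becomes reachable when it is at most the water level and some neighbour is reachable) until a sweep changes nothing, then the corner is read once.
-- outside the precondition, e.g. on BFS([[0, 5], [5]], 0): A returns None, B raises IndexError; on BFS([[1], [0, 0]], 1): A raises IndexError, B raises IndexError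
import Mathlib
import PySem

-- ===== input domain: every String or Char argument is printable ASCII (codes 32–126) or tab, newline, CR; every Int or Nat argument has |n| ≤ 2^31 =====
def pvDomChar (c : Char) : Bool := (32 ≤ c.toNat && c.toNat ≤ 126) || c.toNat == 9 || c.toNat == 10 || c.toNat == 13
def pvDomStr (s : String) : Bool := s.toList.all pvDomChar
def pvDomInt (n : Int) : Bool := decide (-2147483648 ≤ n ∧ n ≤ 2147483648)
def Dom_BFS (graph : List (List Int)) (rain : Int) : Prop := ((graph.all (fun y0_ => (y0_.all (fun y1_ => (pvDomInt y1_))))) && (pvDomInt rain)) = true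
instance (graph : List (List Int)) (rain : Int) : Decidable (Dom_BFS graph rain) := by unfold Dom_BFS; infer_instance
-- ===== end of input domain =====

-- B replaces A's deque BFS (visited matrix, early exit on popping the corner) by a
-- Jacobi-style fixed-point relaxation: whole-grid boolean sweeps repeated until nothing
-- changes, then one read of the corner; same results on the stated domain (objective:
-- alternative algorithm, not claimed faster).

-- ===== shared small helpers (each port uses them as its Python uses the built-ins) =====

-- m[x][y] as an Option (none = IndexError); every call site below is bounds-guarded
def pvRead2 (m : List (List Int)) (x y : Int) : Option Int :=
  (PySem.List.pyGet? m x).bind fun row => PySem.List.pyGet? row y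

-- visited[x][y] += 1 ; call sites guarantee 0 ≤ x, y (the Python bounds-checks first)
def pvSet2 (m : List (List Int)) (x y : Int) : List (List Int) :=
  m.modify x.toNat (fun row => row.modify y.toNat (· + 1))

-- 0 <= x < n and 0 <= y < n
def pvInb (n x y : Int) : Bool :=
  decide (0 ≤ x) && decide (x < n) && decide (0 ≤ y) && decide (y < n)

-- graph[x][y] <= rain (False is unreachable inside Pre_: the read is in bounds there)
def pvGle (graph : List (List Int)) (rain x y : Int) : Bool :=
  (pvRead2 graph x y).any fun g => decide (g ≤ rain)

-- ===== PORT A =====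

-- one iteration of A's 'for i in range(4)' body over the state (queue, visited)
def stepA (graph : List (List Int)) (rain n x y : Int)
    (st : List (Int × Int) × List (List Int)) (i : Int) :
    List (Int × Int) × List (List Int) :=
  let nx := x + (PySem.List.pyGet? [(-1 : Int), 1, 0, 0] i).getD 0
  let ny := y + (PySem.List.pyGet? [(0 : Int), 0, -1, 1] i).getD 0
  if pvInb n nx ny && (pvRead2 st.2 nx ny == some (-1)) && pvGle graph rain nx ny then
    (st.1 ++ [(nx, ny)], pvSet2 st.2 nx ny)
  else st

-- number of still-unvisited (= -1) entries; termination measure component for loopA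
def pvUcount (m : List (List Int)) : Nat :=
  (m.map fun row => row.countP fun v => v == (-1 : Int)).sum

lemma pvRead2_eq (m : List (List Int)) (x y : Int) (hx : 0 ≤ x) (hy : 0 ≤ y) :
    pvRead2 m x y = m[x.toNat]?.bind fun row => row[y.toNat]? := by
  obtain ⟨a, rfl⟩ : ∃ a : Nat, x = (a : Int) := ⟨x.toNat, (Int.toNat_of_nonneg hx).symm⟩
  obtain ⟨b, rfl⟩ : ∃ b : Nat, y = (b : Int) := ⟨y.toNat, (Int.toNat_of_nonneg hy).symm⟩
  simp [pvRead2, PySem.List.pyGet?_natCast]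

lemma pvCountP_modify (row : List Int) : ∀ (j : Nat), row[j]? = some (-1) →
    (row.modify j (· + 1)).countP (fun v => v == (-1 : Int)) + 1
      = row.countP (fun v => v == (-1 : Int)) := by
  induction row with
  | nil => intro j h; simp at h
  | cons a t ih =>
    intro j h
    cases j with
    | zero => simp_all [List.countP_cons]
    | succ j => simp only [List.getElem?_cons_succ] at h
                simp [List.countP_cons, ← ih j h]; omega

lemma pvUcount_modify (m : List (List Int)) : ∀ (i j : Nat) (row : List Int),
    m[i]? = some row → row[j]? = some (-1) →
    pvUcount (m.modify i (fun r => r.modify j (· + 1))) + 1 = pvUcount m := by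
  induction m with
  | nil => intro i j row h; simp at h
  | cons r t ih =>
    intro i j row h hj
    cases i with
    | zero =>
      simp only [List.getElem?_cons_zero, Option.some.injEq] at h
      subst h
      have hc := pvCountP_modify r j hj
      simp [pvUcount]; omega
    | succ i =>
      simp only [List.getElem?_cons_succ] at h
      simp [pvUcount] at *
      have := ih i j row h hj
      simp [pvUcount] at this; omega

lemma pvUcount_set2 (m : List (List Int)) (x y : Int) (hx : 0 ≤ x) (hy : 0 ≤ y)
    (h : pvRead2 m x y = some (-1)) : pvUcount (pvSet2 m x y) + 1 = pvUcount m := by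
  rw [pvRead2_eq m x y hx hy] at h
  rcases Option.bind_eq_some_iff.mp h with ⟨row, hrow, hj⟩
  exact pvUcount_modify m x.toNat y.toNat row hrow hj

lemma stepA_measure (graph : List (List Int)) (rain n x y : Int)
    (st : List (Int × Int) × List (List Int)) (i : Int) :
    5 * pvUcount (stepA graph rain n x y st i).2 + (stepA graph rain n x y st i).1.length
      ≤ 5 * pvUcount st.2 + st.1.length := by
  unfold stepA
  dsimp only
  split
  · next h =>
    simp only [pvInb, Bool.and_eq_true, decide_eq_true_eq, beq_iff_eq] at h
    obtain ⟨⟨⟨⟨⟨hx0, _⟩, hy0⟩, _⟩, hrd⟩, _⟩ := h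
    have := pvUcount_set2 st.2 _ _ hx0 hy0 hrd
    simp; omega
  · exact le_refl _

lemma foldA_measure (graph : List (List Int)) (rain n x y : Int) :
    ∀ (l : List Int) (st : List (Int × Int) × List (List Int)),
    5 * pvUcount ((l.foldl (stepA graph rain n x y) st).2)
      + (l.foldl (stepA graph rain n x y) st).1.length
      ≤ 5 * pvUcount st.2 + st.1.length := by
  intro l
  induction l with
  | nil => intro st; simp
  | cons a t ih =>
    intro st
    calc _ ≤ 5 * pvUcount (stepA graph rain n x y st a).2
              + (stepA graph rain n x y st a).1.length := ih _
      _ ≤ _ := stepA_measure graph rain n x y st a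

-- A's 'while q' loop
def loopA (graph : List (List Int)) (rain n : Int)
    (q : List (Int × Int)) (visited : List (List Int)) : Option Int :=
  match q with
  | [] => none
  | (x, y) :: qt =>
    if x = n - 1 ∧ y = n - 1 then some rain
    else
      let st := (PySem.List.pyRange 0 4 1).foldl (stepA graph rain n x y) (qt, visited)
      loopA graph rain n st.1 st.2
termination_by 5 * pvUcount visited + q.length
decreasing_by
  have h := foldA_measure graph rain n x y (PySem.List.pyRange 0 4 1) (qt, visited)
  dsimp only at h
  simp only [List.length_cons]
  omega

def BFS (graph : List (List Int)) (rain : Int) : Option Int :=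
  match pvRead2 graph 0 0 with
  | none => none      -- here Python's graph[0][0] raises IndexError; outside Pre_BFS
  | some g00 =>
    if g00 > rain then none
    else
      let n : Int := (graph.length : Int)
      let visited0 := List.replicate graph.length (List.replicate graph.length (-1 : Int))
      let visited := visited0.modify 0 (fun row => row.set 0 1)   -- visited[0][0] = 1
      loopA graph rain n [(0, 0)] visited

-- ===== PORT B =====

-- reach[x][y]; every read B performs is in bounds inside Pre_, so the defaults are inert
def rdB (m : List (List Bool)) (x y : Int) : Bool :=
  PySem.List.pyGetD (PySem.List.pyGetD m x []) y false

-- one whole-grid sweep: the inner/outer comprehensions of B's loop body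
def sweepB (graph : List (List Int)) (rain n : Int) (reach : List (List Bool)) :
    List (List Bool) :=
  (PySem.List.pyRange 0 n 1).map fun x =>
    (PySem.List.pyRange 0 n 1).map fun y =>
      rdB reach x y || (pvGle graph rain x y &&
        ((decide (0 < x) && rdB reach (x - 1) y) ||
         (decide (x + 1 < n) && rdB reach (x + 1) y) ||
         (decide (0 < y) && rdB reach x (y - 1)) ||
         (decide (y + 1 < n) && rdB reach x (y + 1))))

-- B's 'for _ in range(n*n)' loop with the 'if new == reach: break' early exit
def loopBF (graph : List (List Int)) (rain n : Int) :
    Nat → List (List Bool) → List (List Bool)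
  | 0, reach => reach
  | Nat.succ k, reach =>
    let new := sweepB graph rain n reach
    if new = reach then reach else loopBF graph rain n k new

def BFS_alt (graph : List (List Int)) (rain : Int) : Option Int :=
  match pvRead2 graph 0 0 with
  | none => none      -- here Python's graph[0][0] raises IndexError; outside Pre_BFS
  | some g00 =>
    if g00 > rain then none
    else
      let n : Int := (graph.length : Int)
      let reach0 := (PySem.List.pyRange 0 n 1).map fun x =>
        (PySem.List.pyRange 0 n 1).map fun y => decide (x = 0) && decide (y = 0)
      let r := loopBF graph rain n (n * n).toNat reach0
      if rdB r (n - 1) (n - 1) then some rain else none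

-- ===== PRECONDITION & SPEC =====

-- Pre_ excludes the grids on which Python A can raise IndexError: an empty grid, an empty
-- first row, and ragged grids (a row shorter than the number of rows) whose flood fill could
-- read a missing cell; when the water level is below the start cell A returns None before
-- reading any other cell, so such inputs stay inside Pre_ whatever the row lengths.
def Pre_BFS (graph : List (List Int)) (rain : Int) : Prop :=
  graph ≠ [] ∧ graph.headD [] ≠ [] ∧
    (rain < (graph.headD []).headD 0 ∨ ∀ row ∈ graph, graph.length ≤ row.length)
instance (graph : List (List Int)) (rain : Int) : Decidable (Pre_BFS graph rain) := by
  unfold Pre_BFS; infer_instance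

def pvWitness_BFS : List (List Int) × Int := ([[0]], 0)

def Spec_BFS (graph : List (List Int)) (rain : Int) (out : Option Int) : Prop :=
  out = BFS_alt graph rain
instance (graph : List (List Int)) (rain : Int) (out : Option Int) :
    Decidable (Spec_BFS graph rain out) := by unfold Spec_BFS; infer_instance

-- ===== CLAIM (what is proved, stated in full; the proofs are below) =====
def Claim_equal_BFS : Prop := ∀ (graph : List (List Int)) (rain : Int),
  Dom_BFS graph rain → Pre_BFS graph rain → Spec_BFS graph rain (BFS graph rain)

-- ===== LEMMAS AND PROOFS =====

-- the four neighbour offsets applied to a cell, in the order A's dx/dy pairs produce them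
def pvNb (c : Int × Int) : List (Int × Int) :=
  [(c.1 - 1, c.2), (c.1 + 1, c.2), (c.1, c.2 - 1), (c.1, c.2 + 1)]

-- cell (x, y) lies inside the n×n grid, n = number of rows of `graph`
def pvInbP (graph : List (List Int)) (c : Int × Int) : Prop :=
  0 ≤ c.1 ∧ c.1 < (graph.length : Int) ∧ 0 ≤ c.2 ∧ c.2 < (graph.length : Int)

-- cell is in bounds and its height is at most the water level
def pvOpenP (graph : List (List Int)) (rain : Int) (c : Int × Int) : Prop :=
  pvInbP graph c ∧ pvGle graph rain c.1 c.2 = true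

-- cell is marked visited in A's matrix (any value other than the initial -1)
def pvVis (graph : List (List Int)) (V : List (List Int)) (c : Int × Int) : Prop :=
  pvInbP graph c ∧ pvRead2 V c.1 c.2 ≠ some (-1)

-- closure of a seed set S under stepping to open neighbours (the reachability predicate)
inductive pvClo (graph : List (List Int)) (rain : Int) (S : Int × Int → Prop) :
    Int × Int → Prop
  | base (c : Int × Int) : S c → pvClo graph rain S c
  | step (c c' : Int × Int) : pvClo graph rain S c → c' ∈ pvNb c →
      pvOpenP graph rain c' → pvClo graph rain S c'

lemma pvClo_mono {graph : List (List Int)} {rain : Int} {S S' : Int × Int → Prop}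
    (h : ∀ c, S c → S' c) : ∀ c, pvClo graph rain S c → pvClo graph rain S' c := by
  intro c hc
  induction hc with
  | base c hs => exact .base c (h c hs)
  | step c c' _ hnb hop ih => exact .step c c' ih hnb hop

lemma pvClo_join {graph : List (List Int)} {rain : Int} {S S' : Int × Int → Prop}
    (h : ∀ c, S' c → pvClo graph rain S c) :
    ∀ c, pvClo graph rain S' c → pvClo graph rain S c := by
  intro c hc
  induction hc with
  | base c hs => exact h c hs
  | step c c' _ hnb hop ih => exact .step c c' ih hnb hop

lemma pvClo_closed {graph : List (List Int)} {rain : Int} {S : Int × Int → Prop}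
    (hcl : ∀ c c', S c → c' ∈ pvNb c → pvOpenP graph rain c' → S c') :
    ∀ c, pvClo graph rain S c → S c := by
  intro c hc
  induction hc with
  | base c hs => exact hs
  | step c c' _ hnb hop ih => exact hcl c c' ih hnb hop

lemma pvInb_iff (graph : List (List Int)) (x y : Int) :
    pvInb (graph.length : Int) x y = true ↔ pvInbP graph (x, y) := by
  simp only [pvInb, pvInbP, Bool.and_eq_true, decide_eq_true_eq]
  tauto

lemma pvRead2_set2 (m : List (List Int)) (x y a b : Int)
    (hx : 0 ≤ x) (hy : 0 ≤ y) (ha : 0 ≤ a) (hb : 0 ≤ b) :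
    pvRead2 (pvSet2 m x y) a b =
      if a = x ∧ b = y then (pvRead2 m x y).map (· + 1) else pvRead2 m a b := by
  rw [pvRead2_eq (pvSet2 m x y) a b ha hb]
  split
  · next hab =>
    obtain ⟨rfl, rfl⟩ := hab
    rw [pvRead2_eq m a b ha hb]
    unfold pvSet2
    cases hm : m[a.toNat]? with
    | none => simp [List.getElem?_modify, hm]
    | some row => simp [List.getElem?_modify, hm]
  · next hab =>
    rw [pvRead2_eq m a b ha hb]
    unfold pvSet2
    by_cases hax : a = x
    · subst hax
      have hby : ¬ b = y := fun hh => hab ⟨rfl, hh⟩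
      have hbt : ¬ (y.toNat = b.toNat) := by omega
      cases hm : m[a.toNat]? with
      | none => simp [List.getElem?_modify, hm]
      | some row => simp [List.getElem?_modify, hm, hbt]
    · have hat : ¬ (x.toNat = a.toNat) := by omega
      simp [List.getElem?_modify, hat]

lemma pvVis_set2 (graph m : List (List Int)) (x y : Int)
    (hinb : pvInbP graph (x, y)) (hread : pvRead2 m x y = some (-1)) (c : Int × Int) :
    pvVis graph (pvSet2 m x y) c ↔ c = (x, y) ∨ pvVis graph m c := by
  obtain ⟨a, b⟩ := c
  have hinb' := hinb
  obtain ⟨hx, hxn, hy, hyn⟩ := hinb'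
  by_cases hab : a = x ∧ b = y
  · obtain ⟨rfl, rfl⟩ := hab
    have hr := pvRead2_set2 m a b a b hx hy hx hy
    rw [if_pos ⟨rfl, rfl⟩, hread] at hr
    unfold pvVis
    dsimp only
    rw [hr]
    constructor
    · intro _; exact Or.inl rfl
    · intro _; exact ⟨hinb, by simp⟩
  · by_cases hin : pvInbP graph (a, b)
    · have hr := pvRead2_set2 m x y a b hx hy hin.1 hin.2.2.1
      rw [if_neg hab] at hr
      unfold pvVis
      dsimp only
      rw [hr]
      simp only [Prod.mk.injEq]
      tauto
    · unfold pvVis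
      simp only [Prod.mk.injEq]
      constructor
      · intro hv; exact absurd hv.1 hin
      · rintro (⟨rfl, rfl⟩ | hv)
        · exact absurd hinb hin
        · exact absurd hv.1 hin

-- A's direction-indexed step, rephrased on the neighbour cell itself
def pvMarkA (graph : List (List Int)) (rain n : Int)
    (st : List (Int × Int) × List (List Int)) (c : Int × Int) :
    List (Int × Int) × List (List Int) :=
  if pvInb n c.1 c.2 && (pvRead2 st.2 c.1 c.2 == some (-1)) && pvGle graph rain c.1 c.2 then
    (st.1 ++ [c], pvSet2 st.2 c.1 c.2)
  else st

lemma pvFold_stepA (graph : List (List Int)) (rain n x y : Int)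
    (st : List (Int × Int) × List (List Int)) :
    (PySem.List.pyRange 0 4 1).foldl (stepA graph rain n x y) st
      = (pvNb (x, y)).foldl (pvMarkA graph rain n) st := by
  have h4 : PySem.List.pyRange 0 4 1 = [0, 1, 2, 3] := by decide
  have e0 : ∀ st, stepA graph rain n x y st 0 = pvMarkA graph rain n st (x - 1, y) := by
    intro st
    show (if pvInb n (x + (-1)) (y + 0) && _ && _ then _ else _) = _
    simp only [pvMarkA]
    norm_num
    rw [show x + (-1 : Int) = x - 1 from by ring]
  have e1 : ∀ st, stepA graph rain n x y st 1 = pvMarkA graph rain n st (x + 1, y) := by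
    intro st
    show (if pvInb n (x + 1) (y + 0) && _ && _ then _ else _) = _
    simp only [pvMarkA]
    norm_num
  have e2 : ∀ st, stepA graph rain n x y st 2 = pvMarkA graph rain n st (x, y - 1) := by
    intro st
    show (if pvInb n (x + 0) (y + (-1)) && _ && _ then _ else _) = _
    simp only [pvMarkA]
    norm_num [show Int.toNat 2 = 2 from rfl]
    rw [show y + (-1 : Int) = y - 1 from by ring]
  have e3 : ∀ st, stepA graph rain n x y st 3 = pvMarkA graph rain n st (x, y + 1) := by
    intro st
    show (if pvInb n (x + 0) (y + 1) && _ && _ then _ else _) = _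
    simp only [pvMarkA]
    norm_num [show Int.toNat 3 = 3 from rfl]
  rw [h4]
  simp only [List.foldl_cons, List.foldl_nil, pvNb, e0, e1, e2, e3]

lemma pvMarkA_facts (graph : List (List Int)) (rain n : Int)
    (hn : n = (graph.length : Int)) (st : List (Int × Int) × List (List Int))
    (c : Int × Int) :
    (∀ z, pvVis graph st.2 z → pvVis graph (pvMarkA graph rain n st c).2 z) ∧
    (∀ z, z ∈ st.1 → z ∈ (pvMarkA graph rain n st c).1) ∧
    (∀ z, z ∈ (pvMarkA graph rain n st c).1 → z ∈ st.1 ∨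
      (z = c ∧ pvVis graph (pvMarkA graph rain n st c).2 z ∧ pvOpenP graph rain c)) ∧
    (∀ z, pvVis graph (pvMarkA graph rain n st c).2 z → pvVis graph st.2 z ∨
      (z = c ∧ z ∈ (pvMarkA graph rain n st c).1 ∧ pvOpenP graph rain c)) ∧
    (pvOpenP graph rain c → pvVis graph (pvMarkA graph rain n st c).2 c) := by
  subst hn
  unfold pvMarkA
  split
  · next h =>
    simp only [Bool.and_eq_true, beq_iff_eq] at h
    obtain ⟨⟨hinb, hrd⟩, hgle⟩ := h
    have hinbP : pvInbP graph (c.1, c.2) := (pvInb_iff graph c.1 c.2).mp hinb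
    have hopen : pvOpenP graph rain c := by
      refine ⟨?_, hgle⟩
      simpa using hinbP
    have hvs := pvVis_set2 graph st.2 c.1 c.2 hinbP hrd
    refine ⟨?_, ?_, ?_, ?_, ?_⟩
    · intro z hz; exact (hvs z).mpr (Or.inr hz)
    · intro z hz; exact List.mem_append_left _ hz
    · intro z hz
      rcases List.mem_append.mp hz with hz | hz
      · exact Or.inl hz
      · simp only [List.mem_singleton] at hz
        subst hz
        refine Or.inr ⟨rfl, (hvs z).mpr (Or.inl ?_), hopen⟩
        simp
    · intro z hz
      rcases (hvs z).mp hz with hz | hz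
      · subst hz
        exact Or.inr ⟨by simp, by simp, hopen⟩
      · exact Or.inl hz
    · intro _
      refine (hvs c).mpr (Or.inl ?_)
      simp
  · next h =>
    simp only [Bool.and_eq_true, beq_iff_eq, not_and] at h
    refine ⟨fun z hz => hz, fun z hz => hz, fun z hz => Or.inl hz, fun z hz => Or.inl hz, ?_⟩
    intro hopen
    have hinb : pvInb (graph.length : Int) c.1 c.2 = true := by
      refine (pvInb_iff graph c.1 c.2).mpr ?_
      simpa using hopen.1
    have hne : pvRead2 st.2 c.1 c.2 ≠ some (-1) := by
      intro hr
      exact h ⟨hinb, hr⟩ hopen.2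
    exact ⟨hopen.1, hne⟩

lemma pvRoundA (graph : List (List Int)) (rain n : Int) (hn : n = (graph.length : Int)) :
    ∀ (cs : List (Int × Int)) (st : List (Int × Int) × List (List Int)),
      (∀ z, pvVis graph st.2 z → pvVis graph (cs.foldl (pvMarkA graph rain n) st).2 z) ∧
      (∀ z, z ∈ st.1 → z ∈ (cs.foldl (pvMarkA graph rain n) st).1) ∧
      (∀ z, z ∈ (cs.foldl (pvMarkA graph rain n) st).1 →
        z ∈ st.1 ∨ pvVis graph (cs.foldl (pvMarkA graph rain n) st).2 z) ∧
      (∀ z, pvVis graph (cs.foldl (pvMarkA graph rain n) st).2 z →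
        pvVis graph st.2 z ∨ z ∈ (cs.foldl (pvMarkA graph rain n) st).1) ∧
      (∀ c, c ∈ cs → pvOpenP graph rain c →
        pvVis graph (cs.foldl (pvMarkA graph rain n) st).2 c) ∧
      (∀ z, pvVis graph (cs.foldl (pvMarkA graph rain n) st).2 z →
        pvVis graph st.2 z ∨ (z ∈ cs ∧ pvOpenP graph rain z)) := by
  intro cs
  induction cs with
  | nil =>
    intro st
    exact ⟨fun z hz => hz, fun z hz => hz, fun z hz => Or.inl hz, fun z hz => Or.inl hz,
      fun c hc => absurd hc (List.not_mem_nil), fun z hz => Or.inl hz⟩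
  | cons c cs ih =>
    intro st
    obtain ⟨m1, m2, m3, m4, m5⟩ := pvMarkA_facts graph rain n hn st c
    obtain ⟨i1, i2, i3, i4, i5, i6⟩ := ih (pvMarkA graph rain n st c)
    simp only [List.foldl_cons]
    refine ⟨?_, ?_, ?_, ?_, ?_, ?_⟩
    · intro z hz; exact i1 z (m1 z hz)
    · intro z hz; exact i2 z (m2 z hz)
    · intro z hz
      rcases i3 z hz with hz' | hz'
      · rcases m3 z hz' with hz'' | hz''
        · exact Or.inl hz''
        · exact Or.inr (i1 z hz''.2.1)
      · exact Or.inr hz'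
    · intro z hz
      rcases i4 z hz with hz' | hz'
      · rcases m4 z hz' with hz'' | hz''
        · exact Or.inl hz''
        · exact Or.inr (i2 z hz''.2.1)
      · exact Or.inr hz'
    · intro d hd hop
      rcases List.mem_cons.mp hd with rfl | hd'
      · exact i1 d (m5 hop)
      · exact i5 d hd' hop
    · intro z hz
      rcases i6 z hz with hz' | hz'
      · rcases m4 z hz' with hz'' | hz''
        · exact Or.inl hz''
        · refine Or.inr ⟨List.mem_cons.mpr (Or.inl hz''.1), ?_⟩
          rw [hz''.1]
          exact hz''.2.2
      · exact Or.inr ⟨List.mem_cons_of_mem _ hz'.1, hz'.2⟩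

-- A's loop invariant
def pvInvA (graph : List (List Int)) (rain n : Int)
    (q : List (Int × Int)) (V : List (List Int)) : Prop :=
  (∀ c ∈ q, pvVis graph V c) ∧
  (pvVis graph V (n - 1, n - 1) → (n - 1, n - 1) ∈ q) ∧
  (∀ c, pvVis graph V c → c ∉ q →
    ∀ c' ∈ pvNb c, pvOpenP graph rain c' → pvVis graph V c')

lemma pvInvA_step (graph : List (List Int)) (rain n x y : Int)
    (hn : n = (graph.length : Int)) (qt : List (Int × Int)) (V : List (List Int))
    (hInv : pvInvA graph rain n ((x, y) :: qt) V)
    (hxy : ¬ (x = n - 1 ∧ y = n - 1)) :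
    pvInvA graph rain n ((pvNb (x, y)).foldl (pvMarkA graph rain n) (qt, V)).1
        ((pvNb (x, y)).foldl (pvMarkA graph rain n) (qt, V)).2 ∧
    (∀ c, pvVis graph ((pvNb (x, y)).foldl (pvMarkA graph rain n) (qt, V)).2 c →
      pvClo graph rain (pvVis graph V) c) ∧
    (∀ c, pvVis graph V c →
      pvVis graph ((pvNb (x, y)).foldl (pvMarkA graph rain n) (qt, V)).2 c) := by
  obtain ⟨h1, h2, h3⟩ := hInv
  obtain ⟨r1, r2, r3, r4, r5, r6⟩ := pvRoundA graph rain n hn (pvNb (x, y)) (qt, V)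
  dsimp only at r1 r2 r3 r4 r5 r6
  have hxymem : pvVis graph V (x, y) := h1 (x, y) List.mem_cons_self
  have hcorner : ¬ ((x, y) = ((n - 1 : Int), (n - 1 : Int))) := by
    simp only [Prod.mk.injEq]
    exact hxy
  refine ⟨⟨?_, ?_, ?_⟩, ?_, r1⟩
  · intro c hc
    rcases r3 c hc with hc' | hc'
    · exact r1 c (h1 c (List.mem_cons_of_mem _ hc'))
    · exact hc'
  · intro hv
    rcases r4 _ hv with hv' | hv'
    · have := h2 hv'
      rcases List.mem_cons.mp this with hh | hh
      · exact absurd hh.symm hcorner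
      · exact r2 _ hh
    · exact hv'
  · intro c hc hcq c' hc' hop
    rcases r4 c hc with hcV | hcq'
    · by_cases hcx : c = (x, y)
      · subst hcx
        exact r5 c' hc' hop
      · have hcnotq : c ∉ (x, y) :: qt := by
          intro hmem
          rcases List.mem_cons.mp hmem with hh | hh
          · exact hcx hh
          · exact hcq (r2 c hh)
        exact r1 c' (h3 c hcV hcnotq c' hc' hop)
    · exact absurd hcq' hcq
  · intro c hc
    rcases r6 c hc with hcV | ⟨hcnb, hcop⟩
    · exact .base c hcV
    · exact .step (x, y) c (.base _ hxymem) hcnb hcop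

lemma pvLoopA_cases (graph : List (List Int)) (rain n : Int) :
    ∀ (q : List (Int × Int)) (V : List (List Int)),
      loopA graph rain n q V = none ∨ loopA graph rain n q V = some rain := by
  intro q V
  fun_induction loopA graph rain n q V with
  | case1 => exact Or.inl rfl
  | case2 => exact Or.inr rfl
  | case3 V x y qt hxy st ih => exact ih

lemma pvLoopA_iff (graph : List (List Int)) (rain n : Int) (hn : n = (graph.length : Int)) :
    ∀ (q : List (Int × Int)) (V : List (List Int)), pvInvA graph rain n q V →
      (loopA graph rain n q V = some rain ↔
        pvClo graph rain (pvVis graph V) (n - 1, n - 1)) := by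
  intro q V
  fun_induction loopA graph rain n q V with
  | case1 V =>
    intro hInv
    obtain ⟨h1, h2, h3⟩ := hInv
    constructor
    · intro h; exact absurd h (by simp)
    · intro hclo
      exfalso
      have hsub : ∀ c, pvClo graph rain (pvVis graph V) c → pvVis graph V c :=
        pvClo_closed (fun c c' hc hnb hop => h3 c hc List.not_mem_nil c' hnb hop)
      exact List.not_mem_nil (h2 (hsub _ hclo))
  | case2 V x y qt hxy =>
    intro hInv
    constructor
    · intro _
      have hv : pvVis graph V (x, y) := hInv.1 _ List.mem_cons_self
      have hc : ((n - 1 : Int), (n - 1 : Int)) = (x, y) := by rw [hxy.1, hxy.2]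
      rw [hc]
      exact .base _ hv
    · intro _; rfl
  | case3 V x y qt hxy st ih =>
    intro hInv
    have hst : st = (pvNb (x, y)).foldl (pvMarkA graph rain n) (qt, V) :=
      pvFold_stepA graph rain n x y (qt, V)
    obtain ⟨hInv', hcloV, hmono⟩ := pvInvA_step graph rain n x y hn qt V hInv hxy
    rw [hst] at ih
    rw [hst]
    rw [ih hInv']
    constructor
    · intro h; exact pvClo_join hcloV _ h
    · intro h; exact pvClo_mono hmono _ h

lemma pvRead2_init (graph : List (List Int)) (a b : Int)
    (hx : 0 ≤ a) (hxn : a < (graph.length : Int)) (hy : 0 ≤ b) (hyn : b < (graph.length : Int)) :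
    pvRead2 ((List.replicate graph.length (List.replicate graph.length (-1 : Int))).modify 0
        (fun row => row.set 0 1)) a b
      = some (if a = 0 ∧ b = 0 then 1 else -1) := by
  rw [pvRead2_eq _ _ _ hx hy]
  have hat : a.toNat < graph.length := by omega
  have hbt : b.toNat < graph.length := by omega
  have hL0 : 0 < graph.length := by omega
  by_cases ha0 : a = 0
  · subst ha0
    simp only [List.getElem?_modify, Int.toNat_zero, if_pos rfl, List.getElem?_replicate,
      if_pos hat, Option.map_some, Option.bind_some]
    by_cases hb0 : b = 0
    · subst hb0
      simp [List.getElem?_set, List.length_replicate, hbt, hL0]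
    · have hbt0 : ¬ ((0 : Nat) = b.toNat) := by omega
      simp [List.getElem?_set, hbt0, List.getElem?_replicate, hat, hbt, hb0, hL0]
  · have hat0 : ¬ ((0 : Nat) = a.toNat) := by omega
    simp [List.getElem?_modify, hat0, List.getElem?_replicate, hat, hbt, ha0]

lemma pvVis_init (graph : List (List Int)) (hL : 0 < graph.length) (c : Int × Int) :
    pvVis graph ((List.replicate graph.length (List.replicate graph.length (-1 : Int))).modify 0
        (fun row => row.set 0 1)) c ↔ c = ((0 : Int), (0 : Int)) := by
  obtain ⟨a, b⟩ := c
  constructor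
  · rintro ⟨⟨hx, hxn, hy, hyn⟩, hne⟩
    have hr := pvRead2_init graph a b hx hxn hy hyn
    by_cases h0 : a = 0 ∧ b = 0
    · simp only [Prod.mk.injEq]
      exact h0
    · rw [if_neg h0] at hr
      exact absurd hr hne
  · intro heq
    obtain ⟨rfl, rfl⟩ : a = 0 ∧ b = 0 := by
      simpa [Prod.mk.injEq] using heq
    have hxn : (0 : Int) < (graph.length : Int) := by exact_mod_cast hL
    refine ⟨⟨le_refl 0, hxn, le_refl 0, hxn⟩, ?_⟩
    rw [pvRead2_init graph 0 0 le_rfl hxn le_rfl hxn]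
    simp

lemma pvInvA_init (graph : List (List Int)) (rain : Int) (hL : 0 < graph.length) :
    pvInvA graph rain (graph.length : Int) [((0 : Int), (0 : Int))]
      ((List.replicate graph.length (List.replicate graph.length (-1 : Int))).modify 0
        (fun row => row.set 0 1)) := by
  refine ⟨?_, ?_, ?_⟩
  · intro c hc
    simp only [List.mem_singleton] at hc
    subst hc
    exact (pvVis_init graph hL _).mpr rfl
  · intro hv
    have h := (pvVis_init graph hL _).mp hv
    simp [h]
  · intro c hv hnc
    exfalso
    apply hnc
    rw [(pvVis_init graph hL c).mp hv]
    simp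

-- ===== B-side lemmas =====

-- reading an n×n comprehension grid at an in-range cell yields the comprehension body
lemma pvRdB_grid (f : Int → Int → Bool) (n x y : Int)
    (hx : 0 ≤ x) (hxn : x < n) (hy : 0 ≤ y) (hyn : y < n) :
    rdB ((PySem.List.pyRange 0 n 1).map fun a =>
          (PySem.List.pyRange 0 n 1).map fun b => f a b) x y = f x y := by
  unfold rdB
  rw [PySem.List.pyGetD_map_pyRange_of_nonneg _ n x _ hx hxn,
    PySem.List.pyGetD_map_pyRange_of_nonneg _ n y _ hy hyn]

-- the sweep at an in-range cell
lemma pvRdB_sweep (graph : List (List Int)) (rain n : Int) (reach : List (List Bool))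
    (x y : Int) (hx : 0 ≤ x) (hxn : x < n) (hy : 0 ≤ y) (hyn : y < n) :
    rdB (sweepB graph rain n reach) x y =
      (rdB reach x y || (pvGle graph rain x y &&
        ((decide (0 < x) && rdB reach (x - 1) y) ||
         (decide (x + 1 < n) && rdB reach (x + 1) y) ||
         (decide (0 < y) && rdB reach x (y - 1)) ||
         (decide (y + 1 < n) && rdB reach x (y + 1))))) := by
  unfold sweepB
  exact pvRdB_grid _ n x y hx hxn hy hyn

-- matrix shape: n rows of n entries
def pvDims (N : Nat) (m : List (List Bool)) : Prop :=
  m.length = N ∧ ∀ row ∈ m, row.length = N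

lemma pvDims_grid (f : Int → Int → Bool) (N : Nat) :
    pvDims N ((PySem.List.pyRange 0 (N : Int) 1).map fun a =>
      (PySem.List.pyRange 0 (N : Int) 1).map fun b => f a b) := by
  constructor
  · simp [PySem.List.length_pyRange_one]
  · intro row hrow
    rcases List.mem_map.mp hrow with ⟨a, _, rfl⟩
    simp [PySem.List.length_pyRange_one]

lemma pvDims_sweep (graph : List (List Int)) (rain : Int) (N : Nat)
    (reach : List (List Bool)) : pvDims N (sweepB graph rain (N : Int) reach) := by
  unfold sweepB
  exact pvDims_grid _ N

-- rdB at Nat coordinates of an in-shape matrix is getElem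
lemma pvRdB_getElem (m : List (List Bool)) (i j : Nat)
    (hi : i < m.length) (hj : j < m[i].length) :
    rdB m (i : Int) (j : Int) = m[i][j] := by
  unfold rdB
  rw [PySem.List.pyGetD_natCast, PySem.List.pyGetD_natCast]
  rw [List.getD_eq_getElem _ _ hi, List.getD_eq_getElem _ _ hj]

-- number of true cells
def pvCnt (m : List (List Bool)) : Nat := (m.map fun row => row.countP id).sum

lemma pvRow_count (r r' : List Bool) (hlen : r.length = r'.length)
    (hle : ∀ i (h : i < r.length), r[i] = true → r'[i]'(by omega) = true) :
    r.countP id ≤ r'.countP id ∧ (r ≠ r' → r.countP id < r'.countP id) := by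
  induction r generalizing r' with
  | nil =>
    cases r' with
    | nil => simp
    | cons b t => simp at hlen
  | cons a t ih =>
    cases r' with
    | nil => simp at hlen
    | cons b t' =>
      have hlen' : t.length = t'.length := by simpa using hlen
      have hle0 : a = true → b = true := by
        intro ha
        exact hle 0 (by simp) ha
      have hlet : ∀ i (h : i < t.length), t[i] = true → t'[i]'(by omega) = true := by
        intro i h hti
        exact hle (i + 1) (by simpa using Nat.succ_lt_succ h) hti
      obtain ⟨hle', hlt'⟩ := ih t' hlen' hlet
      constructor
      · simp only [List.countP_cons, id]
        cases a with
        | false => cases b <;> simp <;> omega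
        | true => simp [hle0 rfl]; omega
      · intro hne
        by_cases hab : a = b
        · subst hab
          have htne : t ≠ t' := by
            intro h; exact hne (by rw [h])
          have := hlt' htne
          simp only [List.countP_cons, id]
          cases a <;> simp <;> omega
        · have ha : a = false := by
            cases a with
            | false => rfl
            | true => exact absurd (hle0 rfl).symm hab
          have hb : b = true := by
            cases b with
            | false => subst ha; exact absurd rfl hab
            | true => rfl
          subst ha hb
          simp only [List.countP_cons, id]
          simp
          omega

lemma pvMat_count (m m' : List (List Bool)) (hlen : m.length = m'.length)
    (hrow : ∀ i (h : i < m.length), m[i].length = (m'[i]'(by omega)).length)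
    (hle : ∀ i (h : i < m.length) j (hj : j < m[i].length),
      m[i][j] = true → (m'[i]'(by omega))[j]'(by have := hrow i h; omega) = true) :
    pvCnt m ≤ pvCnt m' ∧ (m ≠ m' → pvCnt m < pvCnt m') := by
  induction m generalizing m' with
  | nil =>
    cases m' with
    | nil => simp
    | cons b t => simp at hlen
  | cons r t ih =>
    cases m' with
    | nil => simp at hlen
    | cons r' t' =>
      have h0 := pvRow_count r r' (hrow 0 (by simp))
        (fun j hj => hle 0 (by simp) j hj)
      have ht := ih t' (by simpa using hlen)
        (fun i h => hrow (i + 1) (by simpa using Nat.succ_lt_succ h))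
        (fun i h j hj => hle (i + 1) (by simpa using Nat.succ_lt_succ h) j hj)
      constructor
      · simp only [pvCnt, List.map_cons, List.sum_cons]
        have := h0.1; have := ht.1
        simp only [pvCnt] at *
        omega
      · intro hne
        simp only [pvCnt, List.map_cons, List.sum_cons]
        by_cases hr : r = r'
        · subst hr
          have htne : t ≠ t' := fun h => hne (by rw [h])
          have := ht.2 htne
          have := h0.1
          simp only [pvCnt] at *
          omega
        · have := h0.2 hr
          have := ht.1
          simp only [pvCnt] at *
          omega

lemma pvCnt_le (N : Nat) (m : List (List Bool)) (hd : pvDims N m) : pvCnt m ≤ N * N := by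
  obtain ⟨hlen, hrow⟩ := hd
  have h1 : ∀ row ∈ m, row.countP id ≤ N := by
    intro row hr
    calc row.countP id ≤ row.length := List.countP_le_length
      _ = N := hrow row hr
  calc pvCnt m = (m.map fun row => row.countP id).sum := rfl
    _ ≤ (m.map fun _ => N).sum := List.sum_le_sum h1
    _ = N * N := by simp [List.map_const', hlen]


-- a sweep only adds cells (elementwise monotonicity, Nat coordinates)
lemma pvSweep_getElem_mono (graph : List (List Int)) (rain : Int) (N : Nat)
    (reach : List (List Bool)) (hd : pvDims N reach) (i j : Nat) (hi : i < N) (hj : j < N)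
    (hi1 : i < reach.length) (hj1 : j < reach[i].length)
    (hi2 : i < (sweepB graph rain (N : Int) reach).length)
    (hj2 : j < (sweepB graph rain (N : Int) reach)[i].length)
    (h : reach[i][j] = true) :
    (sweepB graph rain (N : Int) reach)[i][j] = true := by
  have e1 : rdB reach (i : Int) (j : Int) = reach[i][j] := pvRdB_getElem reach i j hi1 hj1
  have e2 : rdB (sweepB graph rain (N : Int) reach) (i : Int) (j : Int)
      = (sweepB graph rain (N : Int) reach)[i][j] := pvRdB_getElem _ i j hi2 hj2
  have hs := pvRdB_sweep graph rain (N : Int) reach (i : Int) (j : Int)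
    (by exact_mod_cast Int.natCast_nonneg i) (by exact_mod_cast hi)
    (by exact_mod_cast Int.natCast_nonneg j) (by exact_mod_cast hj)
  rw [e1] at hs
  rw [← e2, hs, h]
  simp

lemma pvSweep_rdB_mono (graph : List (List Int)) (rain : Int) (N : Nat)
    (reach : List (List Bool)) (x y : Int)
    (hx : 0 ≤ x) (hxn : x < (N : Int)) (hy : 0 ≤ y) (hyn : y < (N : Int))
    (h : rdB reach x y = true) :
    rdB (sweepB graph rain (N : Int) reach) x y = true := by
  rw [pvRdB_sweep graph rain (N : Int) reach x y hx hxn hy hyn, h]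
  simp

-- the loop's result is a fixpoint of the sweep (the fuel n*n cannot run out first),
-- keeps the shape, and contains the cells it started from
lemma pvLoopBF_fix (graph : List (List Int)) (rain : Int) (N : Nat) :
    ∀ (fuel : Nat) (reach : List (List Bool)), pvDims N reach →
      N * N < pvCnt reach + fuel →
      sweepB graph rain (N : Int) (loopBF graph rain (N : Int) fuel reach)
          = loopBF graph rain (N : Int) fuel reach ∧
      pvDims N (loopBF graph rain (N : Int) fuel reach) ∧
      (∀ x y : Int, 0 ≤ x → x < (N : Int) → 0 ≤ y → y < (N : Int) →
        rdB reach x y = true →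
        rdB (loopBF graph rain (N : Int) fuel reach) x y = true) := by
  intro fuel
  induction fuel with
  | zero =>
    intro reach hd hcnt
    exact absurd (pvCnt_le N reach hd) (by omega)
  | succ k ih =>
    intro reach hd hcnt
    show (let new := sweepB graph rain (N : Int) reach;
      sweepB graph rain (N : Int) (if new = reach then reach
        else loopBF graph rain (N : Int) k new)
        = (if new = reach then reach else loopBF graph rain (N : Int) k new)) ∧ _
    by_cases hfix : sweepB graph rain (N : Int) reach = reach
    · simp only [loopBF, hfix, if_pos rfl]
      exact ⟨hfix, hd, fun x y _ _ _ _ h => h⟩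
    · have hdn : pvDims N (sweepB graph rain (N : Int) reach) := pvDims_sweep graph rain N reach
      have hlen : reach.length = (sweepB graph rain (N : Int) reach).length := by
        rw [hd.1, hdn.1]
      have hrow : ∀ i (h : i < reach.length),
          reach[i].length = ((sweepB graph rain (N : Int) reach)[i]'(by omega)).length := by
        intro i h
        rw [hd.2 _ (List.getElem_mem h), hdn.2 _ (List.getElem_mem (by omega))]
      have hcntlt : pvCnt reach < pvCnt (sweepB graph rain (N : Int) reach) := by
        refine (pvMat_count reach (sweepB graph rain (N : Int) reach) hlen hrow ?_).2 ?_
        · intro i h j hj hij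
          have hiN : i < N := by rw [← hd.1]; exact h
          have hjN : j < N := by rw [← hd.2 _ (List.getElem_mem h)]; exact hj
          exact pvSweep_getElem_mono graph rain N reach hd i j hiN hjN h hj _ _ hij
        · exact fun hh => hfix hh.symm
      obtain ⟨f1, f2, f3⟩ := ih (sweepB graph rain (N : Int) reach) hdn (by omega)
      simp only [loopBF, if_neg hfix]
      refine ⟨f1, f2, ?_⟩
      intro x y hx hxn hy hyn h
      exact f3 x y hx hxn hy hyn (pvSweep_rdB_mono graph rain N reach x y hx hxn hy hyn h)

-- neighbourhood is symmetric
lemma pvNb_symm (c c' : Int × Int) (h : c' ∈ pvNb c) : c ∈ pvNb c' := by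
  obtain ⟨a, b⟩ := c
  obtain ⟨a', b'⟩ := c'
  simp only [pvNb, List.mem_cons, List.not_mem_nil, or_false, Prod.mk.injEq] at h ⊢
  omega

-- every true cell of the grid is reachable from (0,0) through open cells
def pvSound (graph : List (List Int)) (rain : Int) (m : List (List Bool)) : Prop :=
  ∀ x y : Int, 0 ≤ x → x < (graph.length : Int) → 0 ≤ y → y < (graph.length : Int) →
    rdB m x y = true →
    pvClo graph rain (fun c => c = ((0 : Int), (0 : Int))) (x, y)

lemma pvSweep_sound (graph : List (List Int)) (rain : Int) (reach : List (List Bool))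
    (hs : pvSound graph rain reach) :
    pvSound graph rain (sweepB graph rain (graph.length : Int) reach) := by
  intro x y hx hxn hy hyn h
  rw [pvRdB_sweep graph rain _ reach x y hx hxn hy hyn] at h
  simp only [Bool.or_eq_true, Bool.and_eq_true, decide_eq_true_eq] at h
  have hopen0 : pvGle graph rain x y = true → pvOpenP graph rain (x, y) :=
    fun hg => ⟨⟨hx, hxn, hy, hyn⟩, hg⟩
  rcases h with h | ⟨hg, h⟩
  · exact hs x y hx hxn hy hyn h
  · rcases h with ((⟨hx0, hr⟩ | ⟨hxn', hr⟩) | ⟨hy0, hr⟩) | ⟨hyn', hr⟩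
    · refine .step (x - 1, y) (x, y) (hs _ _ (by omega) (by omega) hy hyn hr) ?_ (hopen0 hg)
      simp [pvNb]
    · refine .step (x + 1, y) (x, y) (hs _ _ (by omega) (by omega) hy hyn hr) ?_ (hopen0 hg)
      simp [pvNb]
    · refine .step (x, y - 1) (x, y) (hs _ _ hx hxn (by omega) (by omega) hr) ?_ (hopen0 hg)
      simp [pvNb]
    · refine .step (x, y + 1) (x, y) (hs _ _ hx hxn (by omega) (by omega) hr) ?_ (hopen0 hg)
      simp [pvNb]

lemma pvLoopBF_sound (graph : List (List Int)) (rain : Int) :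
    ∀ (fuel : Nat) (reach : List (List Bool)), pvSound graph rain reach →
      pvSound graph rain (loopBF graph rain (graph.length : Int) fuel reach) := by
  intro fuel
  induction fuel with
  | zero => intro reach hs; exact hs
  | succ k ih =>
    intro reach hs
    by_cases hfix : sweepB graph rain (graph.length : Int) reach = reach
    · simp only [loopBF, hfix, if_pos rfl]
      exact hs
    · simp only [loopBF, if_neg hfix]
      exact ih _ (pvSweep_sound graph rain reach hs)

-- B's initial grid
def pvR0 (graph : List (List Int)) : List (List Bool) :=
  (PySem.List.pyRange 0 (graph.length : Int) 1).map fun x =>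
    (PySem.List.pyRange 0 (graph.length : Int) 1).map fun y =>
      decide (x = 0) && decide (y = 0)

lemma pvR0_rdB (graph : List (List Int)) (x y : Int)
    (hx : 0 ≤ x) (hxn : x < (graph.length : Int)) (hy : 0 ≤ y) (hyn : y < (graph.length : Int)) :
    rdB (pvR0 graph) x y = (decide (x = 0) && decide (y = 0)) := by
  unfold pvR0
  exact pvRdB_grid _ _ x y hx hxn hy hyn

lemma pvR0_dims (graph : List (List Int)) : pvDims graph.length (pvR0 graph) := by
  unfold pvR0
  exact pvDims_grid _ graph.length

lemma pvR0_cnt (graph : List (List Int)) (hL : 0 < graph.length) : 0 < pvCnt (pvR0 graph) := by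
  have hn : (0 : Int) < (graph.length : Int) := by exact_mod_cast hL
  have h00 : rdB (pvR0 graph) 0 0 = true := by
    rw [pvR0_rdB graph 0 0 le_rfl hn le_rfl hn]
    simp
  cases hm : pvR0 graph with
  | nil =>
    rw [hm] at h00
    simp [rdB, pysem] at h00
  | cons r0 rest =>
    rw [hm] at h00
    cases r0 with
    | nil => simp [rdB, pysem] at h00
    | cons a t =>
      have ha : a = true := by simpa [rdB, pysem] using h00
      subst ha
      simp only [pvCnt, List.map_cons, List.sum_cons, List.countP_cons, id]
      simp

lemma pvR0_sound (graph : List (List Int)) (rain : Int) : pvSound graph rain (pvR0 graph) := by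
  intro x y hx hxn hy hyn h
  rw [pvR0_rdB graph x y hx hxn hy hyn] at h
  simp only [Bool.and_eq_true, decide_eq_true_eq] at h
  obtain ⟨rfl, rfl⟩ := h
  exact .base _ rfl

-- B's result reads true at the corner exactly when the corner is reachable
lemma pvB_iff (graph : List (List Int)) (rain : Int) (hL : 0 < graph.length) :
    (rdB (loopBF graph rain (graph.length : Int)
        (((graph.length : Int) * (graph.length : Int)).toNat) (pvR0 graph))
      ((graph.length : Int) - 1) ((graph.length : Int) - 1) = true)
    ↔ pvClo graph rain (fun c => c = ((0 : Int), (0 : Int)))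
        ((graph.length : Int) - 1, (graph.length : Int) - 1) := by
  have hn : (0 : Int) < (graph.length : Int) := by exact_mod_cast hL
  have hfuel : ((graph.length : Int) * (graph.length : Int)).toNat
      = graph.length * graph.length := by
    rw [← Nat.cast_mul, Int.toNat_natCast]
  obtain ⟨hfix, hdR, hcont⟩ := pvLoopBF_fix graph rain graph.length
    (((graph.length : Int) * (graph.length : Int)).toNat) (pvR0 graph) (pvR0_dims graph)
    (by rw [hfuel]; have := pvR0_cnt graph hL; omega)
  set R := loopBF graph rain (graph.length : Int)
    (((graph.length : Int) * (graph.length : Int)).toNat) (pvR0 graph) with hR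
  constructor
  · intro h
    exact pvLoopBF_sound graph rain _ (pvR0 graph) (pvR0_sound graph rain)
      _ _ (by omega) (by omega) (by omega) (by omega) h
  · intro hclo
    -- the fixpoint's true set is closed under open-neighbour steps and contains (0,0)
    have hS : ∀ c, pvClo graph rain (fun c => c = ((0 : Int), (0 : Int))) c →
        (pvInbP graph c ∧ rdB R c.1 c.2 = true) := by
      intro c hc
      refine pvClo_closed (S := fun c => pvInbP graph c ∧ rdB R c.1 c.2 = true) ?_ c (pvClo_mono ?_ c hc)
      · rintro d c' ⟨hdinb, hdR'⟩ hnb hop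
        refine ⟨hop.1, ?_⟩
        have hc'inb := hop.1
        obtain ⟨hx, hxn, hy, hyn⟩ := hc'inb
        rw [← hfix, pvRdB_sweep graph rain _ R c'.1 c'.2 hx hxn hy hyn]
        have hsym := pvNb_symm d c' hnb
        obtain ⟨a, b⟩ := d
        obtain ⟨a', b'⟩ := c'
        obtain ⟨ha, han, hb, hbn⟩ := hdinb
        simp only [pvNb, List.mem_cons, List.not_mem_nil, or_false, Prod.mk.injEq] at hsym
        simp only [Bool.or_eq_true, Bool.and_eq_true, decide_eq_true_eq]
        rcases hsym with ⟨ha', hb'⟩ | ⟨ha', hb'⟩ | ⟨ha', hb'⟩ | ⟨ha', hb'⟩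
        · -- a = a' - 1, b = b'
          refine Or.inr ⟨hop.2, Or.inl (Or.inl (Or.inl ⟨by omega, ?_⟩))⟩
          rw [show a' - 1 = a from by omega, show b' = b from by omega]
          exact hdR'
        · refine Or.inr ⟨hop.2, Or.inl (Or.inl (Or.inr ⟨by omega, ?_⟩))⟩
          rw [show a' + 1 = a from by omega, show b' = b from by omega]
          exact hdR'
        · refine Or.inr ⟨hop.2, Or.inl (Or.inr ⟨by omega, ?_⟩)⟩
          rw [show a' = a from by omega, show b' - 1 = b from by omega]
          exact hdR'
        · refine Or.inr ⟨hop.2, Or.inr ⟨by omega, ?_⟩⟩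
          rw [show a' = a from by omega, show b' + 1 = b from by omega]
          exact hdR'
      · rintro c rfl
        refine ⟨⟨le_rfl, hn, le_rfl, hn⟩, ?_⟩
        refine hcont 0 0 le_rfl hn le_rfl hn ?_
        rw [pvR0_rdB graph 0 0 le_rfl hn le_rfl hn]
        simp
    exact (hS _ hclo).2

-- main equality
lemma pv_main (graph : List (List Int)) (rain : Int) (hpre : Pre_BFS graph rain) :
    BFS graph rain = BFS_alt graph rain := by
  obtain ⟨hne, hne0, _⟩ := hpre
  have hL : 0 < graph.length := List.length_pos_iff.mpr hne
  have hg00 : pvRead2 graph 0 0 = some ((graph.headD []).headD 0) := by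
    cases graph with
    | nil => simp at hL
    | cons r t =>
      simp only [List.headD_cons] at hne0 ⊢
      cases r with
      | nil => exact absurd rfl hne0
      | cons g rrest =>
        rw [pvRead2_eq (((g :: rrest)) :: t) 0 0 le_rfl le_rfl]
        simp
  set g00 : Int := (graph.headD []).headD 0 with hg00def
  unfold BFS BFS_alt
  rw [hg00]
  dsimp only
  by_cases hgr : g00 > rain
  · rw [if_pos hgr, if_pos hgr]
  · rw [if_neg hgr, if_neg hgr]
    have hA := pvLoopA_iff graph rain (graph.length : Int) rfl [((0 : Int), (0 : Int))]
      ((List.replicate graph.length (List.replicate graph.length (-1 : Int))).modify 0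
        (fun row => row.set 0 1))
      (pvInvA_init graph rain hL)
    have hiff :
        pvClo graph rain (pvVis graph
            ((List.replicate graph.length (List.replicate graph.length (-1 : Int))).modify 0
              (fun row => row.set 0 1)))
          ((graph.length : Int) - 1, (graph.length : Int) - 1)
        ↔ pvClo graph rain (fun c => c = ((0 : Int), (0 : Int)))
            ((graph.length : Int) - 1, (graph.length : Int) - 1) := by
      constructor
      · refine fun h => pvClo_mono ?_ _ h
        intro c hc
        exact (pvVis_init graph hL c).mp hc
      · refine fun h => pvClo_join ?_ _ h
        intro c hc
        rw [hc]
        exact .base _ ((pvVis_init graph hL _).mpr rfl)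
    have hB := pvB_iff graph rain hL
    have hpv : (List.map
        (fun x => List.map (fun y => decide (x = 0) && decide (y = 0))
          (PySem.List.pyRange 0 (graph.length : Int) 1))
        (PySem.List.pyRange 0 (graph.length : Int) 1)) = pvR0 graph := rfl
    rw [hpv]
    rcases pvLoopA_cases graph rain (graph.length : Int) [((0 : Int), (0 : Int))] _ with hA0 | hA0
    · rw [hA0]
      have hnc : ¬ pvClo graph rain (fun c => c = ((0 : Int), (0 : Int)))
          ((graph.length : Int) - 1, (graph.length : Int) - 1) := by
        intro h
        have := hA.mpr (hiff.mpr h)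
        rw [hA0] at this
        exact absurd this (by simp)
      rw [if_neg (fun hh => hnc (hB.mp hh))]
    · rw [hA0]
      have hc := hiff.mp (hA.mp hA0)
      rw [if_pos (hB.mpr hc)]

-- ===== VERDICT (by name: the statement is the Claim_ definition above) =====
theorem BFS_spec : Claim_equal_BFS := by
  intro graph rain _ hpre
  unfold Spec_BFS
  exact pv_main graph rain hpre
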